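-- pv_equiv track=rewrite | github.com/gosch/Katas-in-python | 2018/august/codesignal/differentDigitsNumberSearch.py | differentDigitsNumberSearch
-- ===== SOURCE A (Python) =====
-- def differentDigitsNumberSearch(inputArray):
--     for i in inputArray:
--         check = set()
--         flag = True
--         s = str(i)
--         for j in s:
--             if j in check:
--                 flag = False
--                 break
--             else:
--                 check.add(j)
--         if flag:
--             return i
--     return -1
-- ===== SOURCE B (Python) =====
-- def differentDigitsNumberSearch(inputArray):
--     for i in inputArray:
--         d = sorted(str(i))
--         if all(a != b for a, b in zip(d, d[1:])):
--             return i
--     return -1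
-- ===== Notes on version B (the rewrite author's own statement) =====
-- stated objective: alternative
-- what changed: Replaces A's incremental set-membership inner loop (flag/break, check.add) by a sort-then-scan distinctness test: sort the digit characters and accept when no two adjacent sorted characters are equal, so no set is built at all.
import Mathlib
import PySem

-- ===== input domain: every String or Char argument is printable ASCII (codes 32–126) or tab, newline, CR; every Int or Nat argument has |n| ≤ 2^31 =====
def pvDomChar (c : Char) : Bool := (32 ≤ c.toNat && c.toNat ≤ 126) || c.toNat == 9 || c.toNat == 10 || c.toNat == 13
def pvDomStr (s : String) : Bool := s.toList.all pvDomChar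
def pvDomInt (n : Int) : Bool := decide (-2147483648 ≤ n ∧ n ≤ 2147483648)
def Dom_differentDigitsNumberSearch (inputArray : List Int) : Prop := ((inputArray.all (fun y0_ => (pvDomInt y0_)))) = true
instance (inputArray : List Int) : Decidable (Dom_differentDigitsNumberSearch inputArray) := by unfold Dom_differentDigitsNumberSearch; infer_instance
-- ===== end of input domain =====

-- B replaces A's incremental set-membership inner loop (flag/break, check.add) by a different
-- algorithm: sort the digit characters and accept when no two adjacent sorted characters are equal
-- (no set is built at all); the outer first-match search is kept (alternative, same cost class).

-- ===== PORT A =====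
-- inner loop of A: for j in s: if j in check: flag = False; break; else: check.add(j)
def pvInnerA : List Char → PySem.Set Char → Bool
  | [], _ => true
  | j :: rest, check =>
      if PySem.Set.contains check j then false
      else pvInnerA rest (PySem.Set.add check j)

def differentDigitsNumberSearch : List Int → Int
  | [] => -1
  | i :: rest =>
      if pvInnerA (PySem.Int.toStr i).toList PySem.Set.empty then i
      else differentDigitsNumberSearch rest

-- ===== PORT B =====
-- all(a != b for a, b in zip(d, d[1:])) over the sorted character list d
def pvNoAdjDup : List Char → Bool
  | [] => true
  | [_] => true
  | a :: b :: rest => (a != b) && pvNoAdjDup (b :: rest)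

def differentDigitsNumberSearch_alt : List Int → Int
  | [] => -1
  | i :: rest =>
      if pvNoAdjDup (PySem.List.sorted (PySem.Int.toStr i).toList (fun c => c)) then i
      else differentDigitsNumberSearch_alt rest

-- ===== PRECONDITION & SPEC =====
def Spec_differentDigitsNumberSearch (inputArray : List Int) (out : Int) : Prop := out = differentDigitsNumberSearch_alt inputArray
instance (inputArray : List Int) (out : Int) : Decidable (Spec_differentDigitsNumberSearch inputArray out) := by unfold Spec_differentDigitsNumberSearch; infer_instance

-- ===== CLAIM (what is proved, stated in full; the proofs are below) =====
def Claim_equal_differentDigitsNumberSearch : Prop := ∀ (inputArray : List Int), Dom_differentDigitsNumberSearch inputArray → Spec_differentDigitsNumberSearch inputArray (differentDigitsNumberSearch inputArray)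

-- ===== LEMMAS AND PROOFS =====
-- A's inner loop succeeds iff s is duplicate-free and disjoint from the running set
lemma pv_innerA_iff (s : List Char) (c : PySem.Set Char) :
    pvInnerA s c = true ↔ s.Nodup ∧ ∀ x ∈ s, x ∉ c := by
  induction s generalizing c with
  | nil => simp [pvInnerA]
  | cons j rest ih =>
      simp only [pvInnerA]
      by_cases h : PySem.Set.contains c j
      · rw [if_pos h]
        simp only [Bool.false_eq_true, false_iff]
        rintro ⟨_, hall⟩
        exact hall j List.mem_cons_self (by simpa [PySem.Set.contains] using h)
      · rw [if_neg h, ih]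
        have hj : j ∉ c := by simpa [PySem.Set.contains] using h
        constructor
        · rintro ⟨hnd, hall⟩
          refine ⟨List.nodup_cons.mpr ⟨?_, hnd⟩, ?_⟩
          · intro hmem
            have := hall j hmem
            simp [PySem.Set.mem_add] at this
          · intro x hx
            rcases List.mem_cons.mp hx with rfl | hx'
            · exact hj
            · intro hxc
              exact hall x hx' (by simp [PySem.Set.mem_add, hxc])
        · rintro ⟨hnd, hall⟩
          obtain ⟨hjr, hnd'⟩ := List.nodup_cons.mp hnd
          refine ⟨hnd', ?_⟩
          intro x hx hxadd
          rcases (PySem.Set.mem_add _ _ _).mp hxadd with hxc | rfl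
          · exact hall x (List.mem_cons_of_mem _ hx) hxc
          · exact hjr hx

-- B's adjacent-duplicate scan is IsChain (· ≠ ·)
lemma pv_noAdjDup_iff (l : List Char) :
    pvNoAdjDup l = true ↔ l.IsChain (· ≠ ·) := by
  induction l with
  | nil => simp [pvNoAdjDup]
  | cons a l ih =>
      cases l with
      | nil => simp [pvNoAdjDup]
      | cons b rest =>
          rw [List.isChain_cons_cons, ← ih]
          simp [pvNoAdjDup]

-- on a ≤-sorted list, no adjacent duplicates is exactly Nodup
lemma pv_sorted_noAdj_iff_nodup (l : List Char)
    (hs : l.Pairwise (fun a b => a ≤ b)) :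
    l.IsChain (· ≠ ·) ↔ l.Nodup := by
  constructor
  · intro hc
    have hlt : l.IsChain (· < ·) := by
      have hle : l.IsChain (fun a b => a ≤ b) := hs.isChain
      clear hs
      induction l with
      | nil => simp
      | cons a l ih =>
          cases l with
          | nil => simp
          | cons b rest =>
              rw [List.isChain_cons_cons] at hc hle ⊢
              exact ⟨lt_of_le_of_ne hle.1 hc.1, ih hc.2 hle.2⟩
    exact (hlt.pairwise).imp ne_of_lt
  · intro hnd
    exact hnd.isChain

-- the two per-number tests agree
lemma pv_test_eq (s : List Char) :
    pvInnerA s PySem.Set.empty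
      = pvNoAdjDup (PySem.List.sorted s (fun c => c)) := by
  have hperm : (PySem.List.sorted s (fun c : Char => c) false).Perm s :=
by
    have h := PySem.List.sorted_perm (xs := s) (key := fun c : Char => c) false
    exact h
  have hpw : (PySem.List.sorted s (fun c : Char => c) false).Pairwise
      (fun a b => a ≤ b) := by
    have h := PySem.List.sorted_pairwise (xs := s) (key := fun c : Char => c)
    exact h
  rcases hA : pvInnerA s PySem.Set.empty with _ | _
  · symm
    rw [Bool.eq_false_iff]
    intro hB
    have hnd := (pv_sorted_noAdj_iff_nodup _ hpw).mp ((pv_noAdjDup_iff _).mp hB)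
    have hT : pvInnerA s PySem.Set.empty = true :=
      (pv_innerA_iff s _).mpr ⟨hperm.nodup_iff.mp hnd, by simp [PySem.Set.empty]⟩
    exact absurd (hA.symm.trans hT) (by decide)
  · symm
    have hnd := ((pv_innerA_iff s _).mp hA).1
    exact (pv_noAdjDup_iff _).mpr
      ((pv_sorted_noAdj_iff_nodup _ hpw).mpr (hperm.nodup_iff.mpr hnd))

lemma pv_main (xs : List Int) :
    differentDigitsNumberSearch xs = differentDigitsNumberSearch_alt xs := by
  induction xs with
  | nil => rfl
  | cons i rest ih =>
      simp only [differentDigitsNumberSearch, differentDigitsNumberSearch_alt,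
        pv_test_eq, ih]

-- ===== VERDICT (by name: the statement is the Claim_ definition above) =====
theorem differentDigitsNumberSearch_spec : Claim_equal_differentDigitsNumberSearch := by
  intro xs _
  exact pv_main xs
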